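-- pv_equiv track=rewrite | github.com/Migdalo/migdlib | ciphers/caesar.py | discover_alphabet
-- ===== SOURCE A (Python) =====
-- import string
--
-- def discover_alphabet(convertable, nonumbers=False, addpunct=False):
--     alphabet = []
--     has_upper = False
--     has_lower = False
--     has_digits = False
--     for c in convertable:
--         if c not in alphabet:
--             if c in string.ascii_lowercase:
--                 has_lower = True
--             elif c in string.ascii_uppercase:
--                 has_upper = True
--             elif not nonumbers and c in string.digits:
--                 has_digits = True
--         if has_digits and has_lower and has_upper:
--             break
--         elif nonumbers and has_lower and has_upper:
--             break
--
--     if has_lower: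
--         alphabet.append(string.ascii_lowercase)
--     if has_upper:
--         alphabet.append(string.ascii_uppercase)
--     if has_digits:
--         alphabet.append(string.digits)
--     return ''.join(alphabet)
-- ===== SOURCE B (Python) =====
-- import string
--
-- def discover_alphabet(convertable, nonumbers=False, addpunct=False):
--     has_lower = any(c in string.ascii_lowercase for c in convertable)
--     has_upper = any(c in string.ascii_uppercase for c in convertable)
--     has_digits = (not nonumbers) and any(c in string.digits for c in convertable)
--     return ((string.ascii_lowercase if has_lower else '')
--             + (string.ascii_uppercase if has_upper else '')
--             + (string.digits if has_digits else ''))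
-- ===== Notes on version B (the rewrite author's own statement) =====
-- stated objective: simpler
-- what changed: Replaced the single flag-accumulating loop with dead membership test and break logic by three independent short-circuiting any() scans and a direct concatenation of the selected alphabet blocks.
import Mathlib
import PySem

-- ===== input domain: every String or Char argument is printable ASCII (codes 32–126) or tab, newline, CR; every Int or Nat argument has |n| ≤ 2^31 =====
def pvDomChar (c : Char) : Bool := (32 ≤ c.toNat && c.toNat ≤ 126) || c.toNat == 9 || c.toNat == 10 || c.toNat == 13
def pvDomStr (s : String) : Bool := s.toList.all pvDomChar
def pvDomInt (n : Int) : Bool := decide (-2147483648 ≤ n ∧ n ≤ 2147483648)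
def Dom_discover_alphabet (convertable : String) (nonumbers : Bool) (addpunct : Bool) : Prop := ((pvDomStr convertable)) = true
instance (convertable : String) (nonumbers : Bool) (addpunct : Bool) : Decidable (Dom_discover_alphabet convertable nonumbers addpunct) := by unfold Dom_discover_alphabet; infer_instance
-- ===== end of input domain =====

-- B replaces A's combined flag-accumulating loop (with early break and a dead membership test) by three independent any-scans and direct concatenation; objective: simpler.


-- ===== PORT A =====
def pvLowerA : String := "abcdefghijklmnopqrstuvwxyz"
def pvUpperA : String := "ABCDEFGHIJKLMNOPQRSTUVWXYZ"
def pvDigitsA : String := "0123456789"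

-- A's loop: state (alphabet, has_upper, has_lower, has_digits) with A's early break
def pvLoopA (nonumbers : Bool) : List Char → List String → Bool → Bool → Bool → Bool × Bool × Bool
  | [], _, hu, hl, hd => (hu, hl, hd)
  | c :: rest, alphabet, hu, hl, hd =>
    let st :=
      if ¬ alphabet.contains (String.mk [c]) then
        if pvLowerA.toList.contains c then (hu, true, hd)
        else if pvUpperA.toList.contains c then (true, hl, hd)
        else if !nonumbers && pvDigitsA.toList.contains c then (hu, hl, true)
        else (hu, hl, hd)
      else (hu, hl, hd)
    if st.2.2 && st.2.1 && st.1 then st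
    else if nonumbers && st.2.1 && st.1 then st
    else pvLoopA nonumbers rest alphabet st.1 st.2.1 st.2.2

def discover_alphabet (convertable : String) (nonumbers : Bool) (addpunct : Bool) : String :=
  let st := pvLoopA nonumbers convertable.toList [] false false false
  let alphabet : List String := []
  let alphabet := if st.2.1 then alphabet ++ [pvLowerA] else alphabet
  let alphabet := if st.1 then alphabet ++ [pvUpperA] else alphabet
  let alphabet := if st.2.2 then alphabet ++ [pvDigitsA] else alphabet
  String.join alphabet

-- ===== PORT B =====
def discover_alphabet_alt (convertable : String) (nonumbers : Bool) (addpunct : Bool) : String :=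
  let has_lower := convertable.toList.any (fun c => "abcdefghijklmnopqrstuvwxyz".toList.contains c)
  let has_upper := convertable.toList.any (fun c => "ABCDEFGHIJKLMNOPQRSTUVWXYZ".toList.contains c)
  let has_digits := !nonumbers && convertable.toList.any (fun c => "0123456789".toList.contains c)
  (if has_lower then "abcdefghijklmnopqrstuvwxyz" else "")
    ++ (if has_upper then "ABCDEFGHIJKLMNOPQRSTUVWXYZ" else "")
    ++ (if has_digits then "0123456789" else "")

-- ===== PRECONDITION & SPEC =====
def Spec_discover_alphabet (convertable : String) (nonumbers : Bool) (addpunct : Bool) (out : String) : Prop := out = discover_alphabet_alt convertable nonumbers addpunct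
instance (convertable : String) (nonumbers : Bool) (addpunct : Bool) (out : String) : Decidable (Spec_discover_alphabet convertable nonumbers addpunct out) := by unfold Spec_discover_alphabet; infer_instance

-- ===== CLAIM (what is proved, stated in full; the proofs are below) =====
def Claim_equal_discover_alphabet : Prop := ∀ (convertable : String) (nonumbers : Bool) (addpunct : Bool), Dom_discover_alphabet convertable nonumbers addpunct → Spec_discover_alphabet convertable nonumbers addpunct (discover_alphabet convertable nonumbers addpunct)

-- ===== LEMMAS AND PROOFS =====


lemma pvLower_upper (c : Char) (h : pvLowerA.toList.contains c = true) :
    pvUpperA.toList.contains c = false := by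
  simp [pvLowerA, pvUpperA] at *
  rcases h with h|h|h|h|h|h|h|h|h|h|h|h|h|h|h|h|h|h|h|h|h|h|h|h|h|h <;> subst h <;> decide

lemma pvLower_digit (c : Char) (h : pvLowerA.toList.contains c = true) :
    pvDigitsA.toList.contains c = false := by
  simp [pvLowerA, pvDigitsA] at *
  rcases h with h|h|h|h|h|h|h|h|h|h|h|h|h|h|h|h|h|h|h|h|h|h|h|h|h|h <;> subst h <;> decide

lemma pvUpper_digit (c : Char) (h : pvUpperA.toList.contains c = true) :
    pvDigitsA.toList.contains c = false := by
  simp [pvUpperA, pvDigitsA] at *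
  rcases h with h|h|h|h|h|h|h|h|h|h|h|h|h|h|h|h|h|h|h|h|h|h|h|h|h|h <;> subst h <;> decide

lemma pvLoopA_eq (nonumbers : Bool) (l : List Char) :
    ∀ hu hl hd, pvLoopA nonumbers l [] hu hl hd =
      (hu || l.any (fun c => pvUpperA.toList.contains c),
       hl || l.any (fun c => pvLowerA.toList.contains c),
       hd || (!nonumbers && l.any (fun c => pvDigitsA.toList.contains c))) := by
  induction l with
  | nil => intro hu hl hd; simp [pvLoopA]
  | cons c rest ih =>
    intro hu hl hd
    rw [pvLoopA]
    simp only [List.contains_nil, Bool.false_eq_true, not_false_iff, if_true, List.any_cons]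
    by_cases hlo : pvLowerA.toList.contains c = true
    · have h1 := pvLower_upper c hlo
      have h2 := pvLower_digit c hlo
      simp at hlo h1 h2
      cases hu <;> cases hl <;> cases hd <;> cases nonumbers <;>
        simp [hlo, h1, h2, ih]
    · by_cases hup : pvUpperA.toList.contains c = true
      · have h2 := pvUpper_digit c hup
        simp at hlo hup h2
        cases hu <;> cases hl <;> cases hd <;> cases nonumbers <;>
          simp [hlo, hup, h2, ih]
      · simp at hlo hup
        by_cases hdg : c ∈ pvDigitsA.toList
        · cases hu <;> cases hl <;> cases hd <;> cases nonumbers <;>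
            simp [hlo, hup, hdg, ih]
        · cases hu <;> cases hl <;> cases hd <;> cases nonumbers <;>
            simp [hlo, hup, hdg, ih]

-- ===== VERDICT (by name: the statement is the Claim_ definition above) =====
theorem discover_alphabet_spec : Claim_equal_discover_alphabet := by
  intro convertable nonumbers addpunct _
  unfold Spec_discover_alphabet discover_alphabet discover_alphabet_alt
  rw [pvLoopA_eq]
  have e1 : "abcdefghijklmnopqrstuvwxyz".toList = pvLowerA.toList := rfl
  have e2 : "ABCDEFGHIJKLMNOPQRSTUVWXYZ".toList = pvUpperA.toList := rfl
  have e3 : "0123456789".toList = pvDigitsA.toList := rfl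
  simp only [e1, e2, e3]
  generalize convertable.toList.any (fun c => pvUpperA.toList.contains c) = bu
  generalize convertable.toList.any (fun c => pvLowerA.toList.contains c) = bl
  generalize convertable.toList.any (fun c => pvDigitsA.toList.contains c) = bd
  cases bu <;> cases bl <;> cases nonumbers <;> cases bd <;> rfl
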